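-- pv_equiv track=rewrite | github.com/avilamowski/hyper_jade | ejemplos/ej1-2025-s1-r2/alumn_18.py | digitos_numericos
-- ===== SOURCE A (Python) =====
-- def es_numero(caracter):
--     if "0" <= caracter <= "9":
--         return True
--     else:
--         return False
--
-- def split(texto, separador=" "):
--     resultado = []
--     palabra = ""
--     for char in texto:
--         if char == separador:
--             if palabra:
--                 resultado.append(palabra)
--                 palabra = ""
--         else:
--             palabra += char
--     if palabra:
--         resultado.append(palabra)
--     return resultado
--
-- def digitos_numericos(texto):
--     suma = 0
--     cant_nums = 0
--     lineas = split(texto, "\n")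
--     for i in range(len(lineas)):
--         palabras = split(lineas[i], " ")
--         for j in range(len(palabras)):
--             palabra = palabras[j]
--             number = True
--             for caracter in palabra:
--                 if not es_numero(caracter):
--                     number = False
--             if number:
--                 suma += int(palabra)
--                 cant_nums += 1
--     return suma, cant_nums
-- ===== SOURCE B (Python) =====
-- def digitos_numericos(texto):
--     suma = 0
--     cant_nums = 0
--     val = 0          # integer value of the current token while it is still all-digit
--     has = False      # current token is nonempty
--     alldig = True    # every char of the current token so far is an ASCII digit
--     for c in texto:
--         if c == " " or c == "\n":
--             if has and alldig:
--                 suma += val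
--                 cant_nums += 1
--             val = 0
--             has = False
--             alldig = True
--         else:
--             has = True
--             if alldig:
--                 if "0" <= c <= "9":
--                     val = val * 10 + (ord(c) - 48)
--                 else:
--                     alldig = False
--                     val = 0
--     if has and alldig:
--         suma += val
--         cant_nums += 1
--     return suma, cant_nums
-- ===== Notes on version B (the rewrite author's own statement) =====
-- stated objective: faster
-- what changed: Replaces the split-into-lines, split-into-words, rescan-each-word structure with a single left-to-right character pass that builds no intermediate lists: it accumulates the current token's value, nonemptiness and all-digit flags and flushes on space/newline.
import Mathlib
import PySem

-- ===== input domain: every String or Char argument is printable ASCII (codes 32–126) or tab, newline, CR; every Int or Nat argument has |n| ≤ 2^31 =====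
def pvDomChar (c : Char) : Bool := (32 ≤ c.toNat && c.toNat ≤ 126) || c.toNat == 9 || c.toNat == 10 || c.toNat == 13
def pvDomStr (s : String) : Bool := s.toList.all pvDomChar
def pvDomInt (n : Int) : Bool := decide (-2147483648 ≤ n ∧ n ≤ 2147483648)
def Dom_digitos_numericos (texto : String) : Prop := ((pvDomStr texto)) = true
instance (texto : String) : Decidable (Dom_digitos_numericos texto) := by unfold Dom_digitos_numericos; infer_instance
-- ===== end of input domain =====

-- B replaces A's split-into-lines / split-into-words / rescan-each-word structure by ONE
-- left-to-right character pass holding (sum, count, value, nonempty, all-digit) state,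
-- building no intermediate lists (objective: faster, by constant factor).

-- ===== PORT A =====

-- es_numero: "0" <= caracter <= "9" on a 1-char string is the code-point comparison
def pvEsNumero (caracter : Char) : Bool :=
  if '0' ≤ caracter ∧ caracter ≤ '9' then true else false

-- loop body of A's split: state (resultado, palabra)
def pvSplitStep (sep : Char) (st : List (List Char) × List Char) (c : Char) :
    List (List Char) × List Char :=
  if c = sep then (if st.2 ≠ [] then (st.1 ++ [st.2], []) else st)
  else (st.1, st.2 ++ [c])

def pvSplit (texto : List Char) (sep : Char) : List (List Char) :=
  let st := texto.foldl (pvSplitStep sep) ([], [])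
  if st.2 ≠ [] then st.1 ++ [st.2] else st.1

-- int(palabra): exact for the nonempty all-digit words on which A evaluates it
def pvIntVal (w : List Char) : Int :=
  w.foldl (fun a c => a * 10 + ((c.toNat : Int) - 48)) 0

def digitos_numericos (texto : String) : Int × Int :=
  let lineas := pvSplit texto.toList '\n'
  lineas.foldl (fun acc linea =>
    (pvSplit linea ' ').foldl (fun acc2 palabra =>
      let number := palabra.foldl (fun b caracter => if !pvEsNumero caracter then false else b) true
      if number then (acc2.1 + pvIntVal palabra, acc2.2 + 1) else acc2) acc) (0, 0)

-- ===== PORT B =====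

-- loop body of B: state (suma, cant_nums, val, has, alldig)
def pvAltStep : (Int × Int × Int × Bool × Bool) → Char → (Int × Int × Int × Bool × Bool)
  | (suma, cant, val, has, alldig), c =>
    if c = ' ' ∨ c = '\n' then
      if has && alldig then (suma + val, cant + 1, 0, false, true)
      else (suma, cant, 0, false, true)
    else
      (suma, cant,
       if alldig then (if '0' ≤ c ∧ c ≤ '9' then val * 10 + ((c.toNat : Int) - 48) else 0) else val,
       true,
       if alldig then (if '0' ≤ c ∧ c ≤ '9' then alldig else false) else alldig)

def digitos_numericos_alt (texto : String) : Int × Int :=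
  match texto.toList.foldl pvAltStep (0, 0, 0, false, true) with
  | (suma, cant, val, has, alldig) =>
    if has && alldig then (suma + val, cant + 1) else (suma, cant)

-- ===== PRECONDITION & SPEC =====
def Spec_digitos_numericos (texto : String) (out : Int × Int) : Prop := out = digitos_numericos_alt texto
instance (texto : String) (out : Int × Int) : Decidable (Spec_digitos_numericos texto out) := by unfold Spec_digitos_numericos; infer_instance

-- ===== CLAIM (what is proved, stated in full; the proofs are below) =====
def Claim_equal_digitos_numericos : Prop := ∀ (texto : String), Dom_digitos_numericos texto → Spec_digitos_numericos texto (digitos_numericos texto)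

-- ===== LEMMAS AND PROOFS =====

-- recursive form of A's split with the current word as accumulator
def pvSA (sep : Char → Prop) [DecidablePred sep] : List Char → List Char → List (List Char)
  | pal, [] => if pal = [] then [] else [pal]
  | pal, c :: cs =>
    if sep c then (if pal = [] then pvSA sep [] cs else pal :: pvSA sep [] cs)
    else pvSA sep (pal ++ [c]) cs

def pvFinish (st : List (List Char) × List Char) : List (List Char) :=
  if st.2 ≠ [] then st.1 ++ [st.2] else st.1

-- token consumer shared by both reformulations
def pvTokAcc (acc : Int × Int) (w : List Char) : Int × Int :=
  if w.all (fun c => decide ('0' ≤ c ∧ c ≤ '9')) then (acc.1 + pvIntVal w, acc.2 + 1) else acc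

def pvAltFinish : (Int × Int × Int × Bool × Bool) → Int × Int
  | (suma, cant, val, has, alldig) => if has && alldig then (suma + val, cant + 1) else (suma, cant)

theorem pvEsNumero_eq (c : Char) : pvEsNumero c = decide ('0' ≤ c ∧ c ≤ '9') := by
  simp [pvEsNumero]

theorem foldl_and (p : Char → Bool) (l : List Char) :
    ∀ (b : Bool), l.foldl (fun b c => p c && b) b = (b && l.all p) := by
  induction l with
  | nil => intro b; simp
  | cons c cs ih =>
    intro b
    rw [List.foldl_cons, List.all_cons, ih]
    cases p c <;> cases b <;> simp

-- A's inner boolean loop computes List.all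
theorem foldl_number (l : List Char) (b : Bool) :
    l.foldl (fun b caracter => if !pvEsNumero caracter then false else b) b
      = (b && l.all (fun c => decide ('0' ≤ c ∧ c ≤ '9'))) := by
  have hfun : (fun (b : Bool) (caracter : Char) => if !pvEsNumero caracter then false else b)
      = fun (b : Bool) (c : Char) => (fun c => decide ('0' ≤ c ∧ c ≤ '9')) c && b := by
    funext b c
    simp only [← pvEsNumero_eq]
    cases pvEsNumero c <;> simp
  rw [hfun, foldl_and]

-- A's fold-with-accumulator split equals the recursive pvSA
theorem foldl_split_eq (sep : Char) (l : List Char) :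
    ∀ (res : List (List Char)) (pal : List Char),
      pvFinish (l.foldl (pvSplitStep sep) (res, pal)) = res ++ pvSA (fun c => c = sep) pal l := by
  induction l with
  | nil =>
    intro res pal
    by_cases h : pal = [] <;> simp [pvFinish, pvSA, h]
  | cons c cs ih =>
    intro res pal
    by_cases hc : c = sep
    · by_cases h : pal = [] <;> simp [pvSplitStep, hc, h, ih, pvSA]
    · simp [pvSplitStep, hc, ih, pvSA]

theorem pvSplit_eq (l : List Char) (sep : Char) :
    pvSplit l sep = pvSA (fun c => c = sep) [] l := by
  have := foldl_split_eq sep l [] []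
  simpa [pvSplit, pvFinish] using this

theorem foldl_flatMap_fold {α : Type} (g : α → List Char → α) (h : List Char → List (List Char))
    (L : List (List Char)) :
    ∀ (i : α), (L.flatMap h).foldl g i = L.foldl (fun a x => (h x).foldl g a) i := by
  induction L with
  | nil => intro i; simp
  | cons x xs ih => intro i; simp [List.flatMap_cons, List.foldl_append, ih]

-- flushing the pending word of the space-split accumulator yields the full space-split
theorem flush_split (pal : List Char) :
    (pal.foldl (pvSplitStep ' ') ([], [])).1
      ++ (if (pal.foldl (pvSplitStep ' ') ([], [])).2 = [] then []
          else [(pal.foldl (pvSplitStep ' ') ([], [])).2])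
      = pvSA (fun c => c = ' ') [] pal := by
  have := foldl_split_eq ' ' pal [] []
  simp only [List.nil_append] at this
  rw [← this, pvFinish]
  by_cases h2 : (pal.foldl (pvSplitStep ' ') ([], [])).2 = [] <;> simp [h2]

-- line-splitting then word-splitting composes to splitting on both separators
theorem split_comp (cs : List Char) :
    ∀ (pal : List Char), '\n' ∉ pal →
      ((pvSA (fun c => c = '\n') pal cs).flatMap (pvSA (fun c => c = ' ') []))
        = (pal.foldl (pvSplitStep ' ') ([], [])).1
          ++ pvSA (fun c => c = ' ' ∨ c = '\n') (pal.foldl (pvSplitStep ' ') ([], [])).2 cs := by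
  induction cs with
  | nil =>
    intro pal hpal
    by_cases h : pal = []
    · simp [h, pvSA]
    · rw [show pvSA (fun c => c = '\n') pal [] = [pal] from by simp [pvSA, h],
        List.flatMap_cons, List.flatMap_nil, List.append_nil, ← flush_split pal]
      by_cases h2 : (pal.foldl (pvSplitStep ' ') ([], [])).2 = [] <;> simp [pvSA, h2]
  | cons c cs ih =>
    intro pal hpal
    by_cases hnl : c = '\n'
    · subst hnl
      have ihe := ih [] (by simp)
      simp only [List.foldl_nil] at ihe
      have e2 : ∀ (q : List Char), pvSA (fun c => c = ' ' ∨ c = '\n') q ('\n' :: cs)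
          = if q = [] then pvSA (fun c => c = ' ' ∨ c = '\n') [] cs
            else q :: pvSA (fun c => c = ' ' ∨ c = '\n') [] cs := by
        intro q; simp [pvSA]
      by_cases h : pal = []
      · subst h
        rw [show pvSA (fun c => c = '\n') ([] : List Char) ('\n' :: cs)
            = pvSA (fun c => c = '\n') [] cs from by simp [pvSA], ihe]
        simp [e2]
      · rw [show pvSA (fun c => c = '\n') pal ('\n' :: cs)
            = pal :: pvSA (fun c => c = '\n') [] cs from by simp [pvSA, h],
          List.flatMap_cons, ihe, e2]
        rw [← flush_split pal]
        by_cases h2 : (pal.foldl (pvSplitStep ' ') ([], [])).2 = [] <;> simp [h2]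
    · have hpal' : '\n' ∉ pal ++ [c] := by
        simp only [List.mem_append, List.mem_singleton]
        rintro (hx | hx)
        · exact hpal hx
        · exact hnl hx.symm
      have ihe := ih (pal ++ [c]) hpal'
      have hstep : (pal ++ [c]).foldl (pvSplitStep ' ') ([], [])
          = pvSplitStep ' ' (pal.foldl (pvSplitStep ' ') ([], [])) c := by
        simp [List.foldl_append]
      rw [show pvSA (fun c => c = '\n') pal (c :: cs)
          = pvSA (fun c => c = '\n') (pal ++ [c]) cs from by simp [pvSA, hnl], ihe, hstep]
      by_cases hsp : c = ' '
      · subst hsp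
        by_cases h2 : (pal.foldl (pvSplitStep ' ') ([], [])).2 = [] <;>
          simp [pvSplitStep, h2, pvSA]
      · simp [pvSplitStep, hsp, hnl, pvSA]

-- B's single pass equals the token fold over the both-separator split
theorem alt_run (cs : List Char) :
    ∀ (s k : Int) (pal : List Char),
      pvAltFinish (cs.foldl pvAltStep
          (s, k, (if pal.all (fun c => decide ('0' ≤ c ∧ c ≤ '9')) then pvIntVal pal else 0),
           !pal.isEmpty, pal.all (fun c => decide ('0' ≤ c ∧ c ≤ '9'))))
        = (pvSA (fun c => c = ' ' ∨ c = '\n') pal cs).foldl pvTokAcc (s, k) := by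
  induction cs with
  | nil =>
    intro s k pal
    by_cases h : pal = []
    · simp [h, pvAltFinish, pvIntVal, pvSA]
    · rw [show pvSA (fun c => c = ' ' ∨ c = '\n') pal [] = [pal] from by simp [pvSA, h],
        List.foldl_cons, List.foldl_nil, List.foldl_nil]
      simp only [pvAltFinish, pvTokAcc]
      rw [show (!pal.isEmpty) = true from by simp [h]]
      cases pal.all (fun c => decide ('0' ≤ c ∧ c ≤ '9')) <;> simp
  | cons c cs ih =>
    intro s k pal
    by_cases hb : c = ' ' ∨ c = '\n'
    · by_cases h : pal = []
      · subst h
        rw [List.foldl_cons,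
          show pvAltStep (s, k,
              (if ([] : List Char).all (fun c => decide ('0' ≤ c ∧ c ≤ '9'))
               then pvIntVal ([] : List Char) else 0),
              !([] : List Char).isEmpty,
              ([] : List Char).all (fun c => decide ('0' ≤ c ∧ c ≤ '9'))) c
            = (s, k,
              (if ([] : List Char).all (fun c => decide ('0' ≤ c ∧ c ≤ '9'))
               then pvIntVal ([] : List Char) else 0),
              !([] : List Char).isEmpty,
              ([] : List Char).all (fun c => decide ('0' ≤ c ∧ c ≤ '9')))
            from by simp [pvAltStep, hb, pvIntVal], ih]
        rw [show pvSA (fun c => c = ' ' ∨ c = '\n') ([] : List Char) (c :: cs)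
            = pvSA (fun c => c = ' ' ∨ c = '\n') [] cs from by simp [pvSA, hb]]
      · have hflush : pvAltStep
            (s, k, (if pal.all (fun c => decide ('0' ≤ c ∧ c ≤ '9')) then pvIntVal pal else 0), !pal.isEmpty, pal.all (fun c => decide ('0' ≤ c ∧ c ≤ '9'))) c
            = ((pvTokAcc (s, k) pal).1, (pvTokAcc (s, k) pal).2,
               (if ([] : List Char).all (fun c => decide ('0' ≤ c ∧ c ≤ '9'))
                then pvIntVal ([] : List Char) else 0),
               !([] : List Char).isEmpty,
               ([] : List Char).all (fun c => decide ('0' ≤ c ∧ c ≤ '9'))) := by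
          simp only [pvAltStep, pvTokAcc]
          rw [if_pos hb, show (!pal.isEmpty) = true from by simp [h]]
          cases pal.all (fun c => decide ('0' ≤ c ∧ c ≤ '9')) <;> simp [pvIntVal]
        rw [List.foldl_cons, hflush, ih]
        rw [show pvSA (fun c => c = ' ' ∨ c = '\n') pal (c :: cs)
            = pal :: pvSA (fun c => c = ' ' ∨ c = '\n') [] cs from by simp [pvSA, hb, h]]
        simp
    · have hstep : pvAltStep
          (s, k, (if pal.all (fun c => decide ('0' ≤ c ∧ c ≤ '9')) then pvIntVal pal else 0), !pal.isEmpty, pal.all (fun c => decide ('0' ≤ c ∧ c ≤ '9'))) c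
          = (s, k,
             (if (pal ++ [c]).all (fun c => decide ('0' ≤ c ∧ c ≤ '9'))
              then pvIntVal (pal ++ [c]) else 0),
             !(pal ++ [c]).isEmpty,
             (pal ++ [c]).all (fun c => decide ('0' ≤ c ∧ c ≤ '9'))) := by
        simp only [pvAltStep]
        rw [if_neg hb]
        by_cases hall : pal.all (fun c => decide ('0' ≤ c ∧ c ≤ '9')) = true
        · by_cases hd : '0' ≤ c ∧ c ≤ '9'
          · have h1 : (pal ++ [c]).all (fun c => decide ('0' ≤ c ∧ c ≤ '9')) = true := by
              rw [List.all_append, hall]; simp [hd]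
            rw [hall, h1]
            simp [pvIntVal, List.foldl_append, hd]
          · have h1 : (pal ++ [c]).all (fun c => decide ('0' ≤ c ∧ c ≤ '9')) = false := by
              rw [List.all_append, hall]
              simp only [List.all_cons, List.all_nil, Bool.and_true, Bool.true_and,
                decide_eq_false_iff_not]
              exact hd
            rw [hall, h1]
            simp [hd]
        · rw [Bool.not_eq_true] at hall
          have h1 : (pal ++ [c]).all (fun c => decide ('0' ≤ c ∧ c ≤ '9')) = false := by
            rw [List.all_append, hall]; simp
          rw [hall, h1]
          simp
      rw [List.foldl_cons, hstep, ih]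
      rw [show pvSA (fun c => c = ' ' ∨ c = '\n') pal (c :: cs)
          = pvSA (fun c => c = ' ' ∨ c = '\n') (pal ++ [c]) cs from by simp [pvSA, hb]]

-- ===== VERDICT (by name: the statement is the Claim_ definition above) =====
theorem digitos_numericos_spec : Claim_equal_digitos_numericos := by
  intro texto _
  unfold Spec_digitos_numericos digitos_numericos digitos_numericos_alt
  have hAlt : (match texto.toList.foldl pvAltStep (0, 0, 0, false, true) with
      | (suma, cant, val, has, alldig) =>
        if has && alldig then (suma + val, cant + 1) else (suma, cant))
      = pvAltFinish (texto.toList.foldl pvAltStep (0, 0, 0, false, true)) := by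
    rcases texto.toList.foldl pvAltStep (0, 0, 0, false, true) with ⟨s, k, v, h, a⟩
    rfl
  rw [hAlt]
  have halt := alt_run texto.toList 0 0 []
  simp only [pvIntVal, List.foldl_nil, List.isEmpty_nil, Bool.not_true, List.all_nil,
    if_true] at halt
  rw [halt]
  simp only [foldl_number, Bool.true_and, pvSplit_eq]
  rw [← foldl_flatMap_fold
      (fun acc2 palabra => if palabra.all (fun c => decide ('0' ≤ c ∧ c ≤ '9')) then
        (acc2.1 + pvIntVal palabra, acc2.2 + 1) else acc2)
      (pvSA (fun c => c = ' ') []) _ ((0 : Int), (0 : Int))]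
  have hcomp := split_comp texto.toList [] (by simp)
  simp only [List.foldl_nil, List.nil_append] at hcomp
  rw [hcomp]
  congr 1
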